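-- pv_equiv track=rewrite | github.com/DropbaseHQ/server | server/auth/controllers/policy/policy.py | format_permissions_for_highest_action
-- ===== SOURCE A (Python) =====
-- ALLOWED_ACTIONS = ["own", "edit", "use"]
--
-- def format_permissions_for_highest_action(permissions: list):
--     logged_resources = {}
--     for permission in permissions:
--         subject_id = permission[1]
--         resource = permission[2]
--         action = permission[3]
--
--         if resource in logged_resources:
--             new_action_has_higher_priority = ALLOWED_ACTIONS.index(
--                 action
--             ) < ALLOWED_ACTIONS.index(logged_resources[resource].get("action"))
--
--             if new_action_has_higher_priority:
--                 logged_resources[resource] = {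
--                     "action": action,
--                     "user_id": subject_id,
--                     "resource": resource,
--                 }
--         else:
--             logged_resources[resource] = {
--                 "action": action,
--                 "user_id": subject_id,
--                 "resource": resource,
--             }
--     formatted_permissions = list(logged_resources.values())
--
--     return formatted_permissions
-- ===== SOURCE B (Python) =====
-- ALLOWED_ACTIONS = ["own", "edit", "use"]
--
--
-- def format_permissions_for_highest_action(permissions: list):
--     # Pass 1: group permissions by resource, preserving first-appearance order.
--     groups = {}
--     for permission in permissions:
--         groups.setdefault(permission[2], []).append(permission)
--
--     # Pass 2: collapse each group to its highest-priority permission (strict <,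
--     # so the earliest permission wins ties), then format the winner.
--     formatted_permissions = []
--     for resource, group in groups.items():
--         winner = group[0]
--         for permission in group[1:]:
--             if ALLOWED_ACTIONS.index(permission[3]) < ALLOWED_ACTIONS.index(winner[3]):
--                 winner = permission
--         formatted_permissions.append(
--             {"action": winner[3], "user_id": winner[1], "resource": resource}
--         )
--     return formatted_permissions
-- ===== Notes on version B (the rewrite author's own statement) =====
-- stated objective: alternative
-- what changed: A keeps a dict of current winners and re-decides the winner while scanning; B first groups the permissions by resource into an ordered dict of lists, then collapses each group to its winner in a second pass before formatting.
import Mathlib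
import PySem

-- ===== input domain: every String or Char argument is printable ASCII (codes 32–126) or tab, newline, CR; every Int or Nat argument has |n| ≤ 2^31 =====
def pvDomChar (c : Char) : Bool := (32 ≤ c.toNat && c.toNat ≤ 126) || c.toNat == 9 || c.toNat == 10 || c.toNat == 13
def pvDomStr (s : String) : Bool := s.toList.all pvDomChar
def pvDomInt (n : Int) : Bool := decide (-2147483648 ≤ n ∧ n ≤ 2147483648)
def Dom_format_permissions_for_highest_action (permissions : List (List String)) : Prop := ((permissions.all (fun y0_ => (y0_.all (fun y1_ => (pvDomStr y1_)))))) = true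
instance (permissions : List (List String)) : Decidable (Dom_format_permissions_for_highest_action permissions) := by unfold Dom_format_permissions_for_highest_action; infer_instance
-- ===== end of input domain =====

-- B replaces A's single scan (dict of current winners, re-decided in place) by a
-- group-by-resource pass followed by a per-group reduction to the winner (objective: alternative decomposition).

-- shared helpers: the fields a permission row is read at, the action-priority index, the output row
def pvAllowed : List String := ["own", "edit", "use"]
def pvSub (p : List String) : String := (PySem.List.pyGet? p 1).getD ""
def pvRes (p : List String) : String := (PySem.List.pyGet? p 2).getD ""
def pvAct (p : List String) : String := (PySem.List.pyGet? p 3).getD ""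
-- ALLOWED_ACTIONS.index(a); Pre_ guarantees every index call Python makes succeeds
def pvIdx (a : String) : Nat := (PySem.List.index? pvAllowed a).getD 0
def pvFmt (a s r : String) : List (String × String) := [("action", a), ("user_id", s), ("resource", r)]

-- ===== PORT A =====
def pvStepA (d : PySem.Dict String (List (String × String))) (p : List String) :
    PySem.Dict String (List (String × String)) :=
  let s := pvSub p
  let r := pvRes p
  let a := pvAct p
  match d.get? r with
  | some cur =>
      -- cur.get("action") never returns None: every stored dict carries "action"
      if pvIdx a < pvIdx ((PySem.Dict.get? ⟨cur⟩ "action").getD "") then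
        d.insert r (pvFmt a s r)
      else d
  | none => d.insert r (pvFmt a s r)

def format_permissions_for_highest_action (permissions : List (List String)) : List (List (String × String)) :=
  (permissions.foldl pvStepA PySem.Dict.empty).values

-- ===== PORT B =====
-- pass 1: groups.setdefault(p[2], []).append(p)
def pvGroupStep (d : PySem.Dict String (List (List String))) (p : List String) :
    PySem.Dict String (List (List String)) :=
  d.modify (pvRes p) [] (· ++ [p])

-- pass 2 inner loop: winner = group[0]; for p in group[1:]: winner = p if higher priority
def pvWin (w p : List String) : List String :=
  if pvIdx (pvAct p) < pvIdx (pvAct w) then p else w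

def pvCollapse (g : List (List String)) : List String := g.tail.foldl pvWin (g.headD [])

def format_permissions_for_highest_action_alt (permissions : List (List String)) : List (List (String × String)) :=
  let groups := permissions.foldl pvGroupStep PySem.Dict.empty
  groups.items.map (fun rg => pvFmt (pvAct (pvCollapse rg.2)) (pvSub (pvCollapse rg.2)) rg.1)

-- ===== PRECONDITION & SPEC =====
-- Pre_ = exactly the inputs where Python A returns: every row has ≥ 4 fields (else IndexError),
-- and every row whose resource field occurs in ≥ 2 rows has a valid action (else ValueError from .index).
def Pre_format_permissions_for_highest_action (permissions : List (List String)) : Prop :=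
  ∀ p ∈ permissions, 4 ≤ p.length ∧
    (2 ≤ permissions.countP (fun q => PySem.List.pyGet? q 2 == PySem.List.pyGet? p 2) →
      PySem.List.pyGet? p 3 = some "own" ∨ PySem.List.pyGet? p 3 = some "edit" ∨
        PySem.List.pyGet? p 3 = some "use")
instance (permissions : List (List String)) : Decidable (Pre_format_permissions_for_highest_action permissions) := by unfold Pre_format_permissions_for_highest_action; infer_instance

def pvWitness_format_permissions_for_highest_action : List (List String) :=
  [["p1", "u1", "r1", "use"], ["p2", "u2", "r1", "own"], ["p3", "u3", "r2", "edit"]]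

def Spec_format_permissions_for_highest_action (permissions : List (List String)) (out : List (List (String × String))) : Prop := out = format_permissions_for_highest_action_alt permissions
instance (permissions : List (List String)) (out : List (List (String × String))) : Decidable (Spec_format_permissions_for_highest_action permissions out) := by unfold Spec_format_permissions_for_highest_action; infer_instance

-- ===== CLAIM (what is proved, stated in full; the proofs are below) =====
def Claim_equal_format_permissions_for_highest_action : Prop := ∀ (permissions : List (List String)), Dom_format_permissions_for_highest_action permissions → Pre_format_permissions_for_highest_action permissions → Spec_format_permissions_for_highest_action permissions (format_permissions_for_highest_action permissions)

-- ===== LEMMAS AND PROOFS =====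
-- Equivalence in fact holds for every input of the ports; Pre_ marks where the Python A returns at all.

-- the formatted row B produces for the group stored under key r
def pvEntry (rg : String × List (List String)) : String × List (String × String) :=
  (rg.1, pvFmt (pvAct (pvCollapse rg.2)) (pvSub (pvCollapse rg.2)) rg.1)

-- the winner dict A maintains, expressed as B's group dict mapped through pvEntry
def pvF (d : PySem.Dict String (List (List String))) : PySem.Dict String (List (String × String)) :=
  ⟨d.items.map pvEntry⟩

theorem pvCollapse_append (g : List (List String)) (p : List String) (hg : g ≠ []) :
    pvCollapse (g ++ [p]) = pvWin (pvCollapse g) p := by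
  cases g with
  | nil => exact absurd rfl hg
  | cons h t => simp [pvCollapse, List.foldl_append]

theorem pvF_get?_eq (d : PySem.Dict String (List (List String))) (k : String) :
    (pvF d).get? k = (d.items.find? (fun rg => rg.1 == k)).map (fun rg => (pvEntry rg).2) := by
  have hp : ((fun p : String × List (String × String) => p.1 == k) ∘ pvEntry)
      = (fun rg : String × List (List String) => rg.1 == k) := by
    funext rg; rfl
  simp [pvF, PySem.Dict.get?, List.find?_map, hp, Option.map_map, Function.comp_def]

theorem pvF_get?_some {d : PySem.Dict String (List (List String))} {k : String}
    {g : List (List String)} (h : d.get? k = some g) :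
    (pvF d).get? k = some (pvFmt (pvAct (pvCollapse g)) (pvSub (pvCollapse g)) k) := by
  rw [pvF_get?_eq]
  unfold PySem.Dict.get? at h
  cases hf : d.items.find? (fun rg => rg.1 == k) with
  | none => rw [hf] at h; simp at h
  | some rg =>
      rw [hf] at h
      have hkey : rg.1 = k := by simpa using List.find?_some hf
      have hval : rg.2 = g := by simpa using h
      simp [pvEntry, hkey, hval]

theorem pvF_get?_none {d : PySem.Dict String (List (List String))} {k : String}
    (h : d.get? k = none) : (pvF d).get? k = none := by
  rw [pvF_get?_eq]
  unfold PySem.Dict.get? at h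
  cases hf : d.items.find? (fun rg => rg.1 == k) with
  | none => simp
  | some rg => rw [hf] at h; simp at h

theorem pvF_keys (d : PySem.Dict String (List (List String))) : (pvF d).keys = d.keys := by
  simp [pvF, PySem.Dict.keys, List.map_map, pvEntry, Function.comp_def]

theorem pvF_contains (d : PySem.Dict String (List (List String))) (k : String) :
    (pvF d).contains k = d.contains k := by
  simp [pvF, PySem.Dict.contains, List.any_map, pvEntry, Function.comp_def]

theorem pvF_insert (d : PySem.Dict String (List (List String))) (k : String) (g : List (List String)) :
    pvF (d.insert k g) = (pvF d).insert k (pvFmt (pvAct (pvCollapse g)) (pvSub (pvCollapse g)) k) := by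
  by_cases h : d.contains k
  · simp only [PySem.Dict.insert, h, pvF_contains, if_pos]
    simp only [pvF, List.map_map]
    congr 1
    apply List.map_congr_left
    intro rg _
    by_cases hk : rg.1 = k <;> simp [pvEntry, hk]
  · have h' : d.contains k = false := by simpa using h
    simp only [PySem.Dict.insert, h', pvF_contains, Bool.false_eq_true, if_neg, not_false_iff]
    simp [pvF, pvEntry]

theorem insert_self_of_get? {ν : Type} {d : PySem.Dict String ν} {k : String} {v : ν}
    (h : d.get? k = some v) (hnd : d.keys.Nodup) : d.insert k v = d := by
  obtain ⟨l⟩ := d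
  induction l with
  | nil => simp [PySem.Dict.get?] at h
  | cons hd tl ih =>
      have hnd' : hd.1 ∉ tl.map (·.1) ∧ (tl.map (·.1)).Nodup := by
        simpa [PySem.Dict.keys] using hnd
      by_cases hk : hd.1 = k
      · have hv : hd.2 = v := by
          simpa [PySem.Dict.get?, List.find?_cons, hk] using h
        have hcon : PySem.Dict.contains (⟨hd :: tl⟩ : PySem.Dict String ν) k = true := by
          simp [PySem.Dict.contains, hk]
        simp only [PySem.Dict.insert, hcon, if_pos]
        congr 1
        simp only [List.map_cons]
        congr 1
        · rw [if_pos (by simp [hk]), ← hk, ← hv]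
        · rw [show tl = tl.map id by simp]
          rw [List.map_map]
          apply List.map_congr_left
          intro p hp
          simp only [Function.comp_def, id]
          have : p.1 ≠ k := by
            intro hpk
            exact hnd'.1 (by rw [hk, ← hpk]; exact List.mem_map_of_mem hp)
          simp [this]
      · have h' : PySem.Dict.get? (⟨tl⟩ : PySem.Dict String ν) k = some v := by
          simpa [PySem.Dict.get?, List.find?_cons, hk] using h
        have hcontl : PySem.Dict.contains (⟨tl⟩ : PySem.Dict String ν) k = true := by
          simp only [PySem.Dict.contains]
          cases hf : tl.find? (fun p => p.1 == k) with
          | none => simp [PySem.Dict.get?, hf] at h'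
          | some rg =>
              have := List.find?_some hf
              exact List.any_eq_true.mpr ⟨rg, List.mem_of_find?_eq_some hf, this⟩
        have hcon : PySem.Dict.contains (⟨hd :: tl⟩ : PySem.Dict String ν) k = true := by
          simp [PySem.Dict.contains] at hcontl ⊢
          exact Or.inr hcontl
        have ihr := ih h' hnd'.2
        simp only [PySem.Dict.insert, hcontl, if_pos] at ihr
        have ihr' : tl.map (fun p => if (p.1 == k) = true then (k, v) else p) = tl := by
          exact congrArg PySem.Dict.items ihr
        simp only [PySem.Dict.insert, hcon, if_pos]
        congr 1
        simp only [List.map_cons]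
        rw [if_neg (by simp [hk]), ihr']

-- Dict.get? on the stored formatted row: it always finds "action" first
theorem get?_fmt_action (a s r : String) :
    (PySem.Dict.get? (⟨pvFmt a s r⟩ : PySem.Dict String String) "action") = some a := by
  simp [PySem.Dict.get?, pvFmt]

theorem pv_step_comm (d : PySem.Dict String (List (List String))) (p : List String)
    (hne : ∀ rg ∈ d.items, rg.2 ≠ []) (hnd : d.keys.Nodup) :
    pvStepA (pvF d) p = pvF (pvGroupStep d p) := by
  cases hg : d.get? (pvRes p) with
  | none =>
      have h1 := pvF_get?_none hg
      have h2 : d.getD (pvRes p) [] = [] := by simp [PySem.Dict.getD, hg]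
      simp only [pvStepA, pvGroupStep, PySem.Dict.modify, h1, h2, List.nil_append]
      rw [pvF_insert]
      rfl
  | some g =>
      have hgs := pvF_get?_some hg
      have h2 : d.getD (pvRes p) [] = g := by simp [PySem.Dict.getD, hg]
      have hgne : g ≠ [] := by
        have hfind : d.items.find? (fun rg => rg.1 == pvRes p) = some (pvRes p, g) ∨
            ∃ rg, d.items.find? (fun rg => rg.1 == pvRes p) = some rg ∧ rg.2 = g := by
          unfold PySem.Dict.get? at hg
          cases hf : d.items.find? (fun rg => rg.1 == pvRes p) with
          | none => rw [hf] at hg; simp at hg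
          | some rg => rw [hf] at hg; exact Or.inr ⟨rg, rfl, by simpa using hg⟩
        rcases hfind with hf | ⟨rg, hf, hv⟩
        · exact hne _ (List.mem_of_find?_eq_some hf)
        · rw [← hv]; exact hne _ (List.mem_of_find?_eq_some hf)
      simp only [pvStepA, pvGroupStep, PySem.Dict.modify, h2, hgs, get?_fmt_action,
        Option.getD_some]
      rw [pvF_insert, pvCollapse_append g p hgne]
      unfold pvWin
      by_cases hc : pvIdx (pvAct p) < pvIdx (pvAct (pvCollapse g))
      · simp only [hc, if_pos]
      · simp only [hc, if_neg, not_false_iff]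
        exact (insert_self_of_get? hgs (by rw [pvF_keys]; exact hnd)).symm

theorem pv_groupStep_ne (d : PySem.Dict String (List (List String))) (p : List String)
    (hne : ∀ rg ∈ d.items, rg.2 ≠ []) :
    ∀ rg ∈ (pvGroupStep d p).items, rg.2 ≠ [] := by
  intro rg hmem
  simp only [pvGroupStep, PySem.Dict.modify, PySem.Dict.insert] at hmem
  by_cases hc : d.contains (pvRes p)
  · simp only [hc, if_pos, List.mem_map] at hmem
    obtain ⟨orig, horig, heq⟩ := hmem
    by_cases hk : orig.1 == pvRes p
    · rw [hk] at heq  -- heq : (if true ...) = rg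
      simp only [if_pos] at heq
      rw [← heq]
      simp
    · simp only [hk, Bool.false_eq_true, if_neg, not_false_iff] at heq
      rw [← heq]; exact hne _ horig
  · have hc' : d.contains (pvRes p) = false := by simpa using hc
    simp only [hc', Bool.false_eq_true, if_neg, not_false_iff, List.mem_append,
      List.mem_singleton] at hmem
    rcases hmem with hmem | hmem
    · exact hne _ hmem
    · rw [hmem]; simp

theorem pv_inv (ps : List (List String)) (d : PySem.Dict String (List (List String)))
    (hne : ∀ rg ∈ d.items, rg.2 ≠ []) (hnd : d.keys.Nodup) :
    ps.foldl pvStepA (pvF d) = pvF (ps.foldl pvGroupStep d) := by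
  induction ps generalizing d with
  | nil => rfl
  | cons p ps ih =>
      simp only [List.foldl_cons]
      rw [pv_step_comm d p hne hnd]
      exact ih (pvGroupStep d p) (pv_groupStep_ne d p hne)
        (PySem.Dict.nodup_keys_insert _ _ _ hnd)

-- ===== VERDICT (by name: the statement is the Claim_ definition above) =====
theorem format_permissions_for_highest_action_spec : Claim_equal_format_permissions_for_highest_action := by
  intro permissions _ _
  unfold Spec_format_permissions_for_highest_action
  unfold format_permissions_for_highest_action format_permissions_for_highest_action_alt
  have h := pv_inv permissions PySem.Dict.empty (by simp [PySem.Dict.empty]) (by simp [PySem.Dict.empty, PySem.Dict.keys])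
  have he : pvF PySem.Dict.empty = PySem.Dict.empty := rfl
  rw [he] at h
  rw [h]
  simp [pvF, PySem.Dict.values, List.map_map, pvEntry, Function.comp_def]
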